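-- pv_equiv track=rewrite | github.com/6587093polakornming/DataStructureProject1 | tree.py | fixNamecell
-- ===== SOURCE A (Python) =====
-- def fixNamecell(stringlist:list):
--     out=list()
--     # stringlist.insert(0,"(");stringlist.append(")")
--     while stringlist:
--         char = stringlist.pop(0)
--         if char.isalpha():  #string method
--             while stringlist and stringlist[0].isnumeric() :
--                 next = stringlist.pop(0)
--                 if char.isalpha():
--                     char = str(char)+" "+str(next)
--                 else:
--                     char += str(next)
--         out.append(char)
--     return out
-- ===== SOURCE B (Python) =====
-- def fixNamecell(stringlist: list):
--     # Single forward state-machine pass over a snapshot; clears stringlist like the original.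
--     out = []
--     merging = False
--     first = False
--     for tok in list(stringlist):
--         if tok.isalpha():
--             out.append(tok)
--             merging = True
--             first = True
--         elif tok.isnumeric():
--             if merging:
--                 if first:
--                     out[-1] += " " + tok
--                     first = False
--                 else:
--                     out[-1] += tok
--             else:
--                 out.append(tok)
--         else:
--             out.append(tok)
--             merging = False
--     stringlist.clear()
--     return out
-- ===== Notes on version B (the rewrite author's own statement) =====
-- stated objective: faster
-- what changed: Replaces A's destructive pop-from-front outer loop with a nested pop-absorbing inner while by a single forward for-loop over a snapshot that keeps a merging/first state machine and splices numeric tokens into the last output element.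
import Mathlib
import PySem

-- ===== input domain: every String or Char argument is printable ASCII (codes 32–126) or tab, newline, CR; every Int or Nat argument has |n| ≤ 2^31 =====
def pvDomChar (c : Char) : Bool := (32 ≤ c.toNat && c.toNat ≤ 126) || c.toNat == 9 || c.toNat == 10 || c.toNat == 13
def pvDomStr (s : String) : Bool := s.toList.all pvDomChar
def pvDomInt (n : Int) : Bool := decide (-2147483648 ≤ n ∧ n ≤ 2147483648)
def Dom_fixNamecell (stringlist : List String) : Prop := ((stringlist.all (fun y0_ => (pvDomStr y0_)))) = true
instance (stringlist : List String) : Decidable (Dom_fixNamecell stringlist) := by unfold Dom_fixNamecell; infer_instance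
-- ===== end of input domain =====

-- B is a single forward state-machine pass instead of A's destructive pop-from-front loop with a
-- nested absorbing while; equivalence is about the RETURN value only (A empties its argument in
-- place; the Python B reproduces that side effect with stringlist.clear()).
-- .isnumeric() is ported as PySem.Str.strIsdigit: they coincide on the ASCII domain Dom_.

-- ===== PORT A =====
-- the inner `while stringlist and stringlist[0].isnumeric(): next = stringlist.pop(0); …`
def absorbA (char : String) : List String → String × List String
  | [] => (char, [])
  | n :: rest =>
    if PySem.Str.strIsdigit n then
      absorbA (if PySem.Str.strIsalpha char then char ++ " " ++ n else char ++ n) rest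
    else (char, n :: rest)

theorem absorbA_len (l : List String) : ∀ char, (absorbA char l).2.length ≤ l.length := by
  induction l with
  | nil => intro char; simp [absorbA]
  | cons n rest ih =>
    intro char
    simp only [absorbA]
    split
    · exact (ih _).trans (Nat.le_succ _)
    · simp

def fixNamecell (stringlist : List String) : List String :=
  match stringlist with
  | [] => []
  | char :: rest =>
    if PySem.Str.strIsalpha char then
      (absorbA char rest).1 :: fixNamecell (absorbA char rest).2
    else char :: fixNamecell rest
termination_by stringlist.length
decreasing_by
  · have := absorbA_len rest char; simp; omega
  · simp

-- ===== PORT B =====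
-- one step of Source B's for-loop; state = (out in REVERSE order, merging, first)
def stepB (s : List String × Bool × Bool) (tok : String) : List String × Bool × Bool :=
  if PySem.Str.strIsalpha tok then (tok :: s.1, true, true)
  else if PySem.Str.strIsdigit tok then
    if s.2.1 then
      match s.1 with
      | last :: outRest =>
        if s.2.2 then ((last ++ " " ++ tok) :: outRest, true, false)
        else ((last ++ tok) :: outRest, true, s.2.2)
      | [] => (tok :: s.1, true, s.2.2)   -- unreachable: merging ⇒ out nonempty
    else (tok :: s.1, false, s.2.2)
  else (tok :: s.1, false, s.2.2)

def fixNamecell_alt (stringlist : List String) : List String :=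
  ((stringlist.foldl stepB ([], false, false)).1).reverse

-- ===== PRECONDITION & SPEC =====
def Spec_fixNamecell (stringlist : List String) (out : List String) : Prop := out = fixNamecell_alt stringlist
instance (stringlist : List String) (out : List String) : Decidable (Spec_fixNamecell stringlist out) := by unfold Spec_fixNamecell; infer_instance

-- ===== CLAIM (what is proved, stated in full; the proofs are below) =====
def Claim_equal_fixNamecell : Prop := ∀ (stringlist : List String), Dom_fixNamecell stringlist → Spec_fixNamecell stringlist (fixNamecell stringlist)

-- ===== LEMMAS AND PROOFS =====

theorem digit_not_alpha (c : Char) (h : PySem.Chars.isdigit c = true) :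
    PySem.Chars.isalpha c = false := by
  simp [PySem.Chars.isdigit, Char.le_def, UInt32.le_iff_toNat_le] at h
  simp [PySem.Chars.isalpha, PySem.Chars.isupper, PySem.Chars.islower, Char.le_def,
    UInt32.le_iff_toNat_le]
  omega

theorem strdigit_not_alpha (n : String) (h : PySem.Str.strIsdigit n = true) :
    PySem.Str.strIsalpha n = false := by
  simp [PySem.Str.strIsdigit, PySem.Chars.strIsdigit] at h
  have hne : n.toList ≠ [] := by simpa using h.1
  obtain ⟨c, hc⟩ := List.exists_mem_of_ne_nil _ hne
  simp [PySem.Str.strIsalpha, PySem.Chars.strIsalpha, h.1]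
  exact ⟨c, hc, by simpa using digit_not_alpha c (h.2 c hc)⟩

theorem append_digit_not_alpha (char n : String) (h : PySem.Str.strIsdigit n = true) :
    PySem.Str.strIsalpha (char ++ n) = false := by
  simp [PySem.Str.strIsdigit, PySem.Chars.strIsdigit] at h
  have hne : n.toList ≠ [] := by simpa using h.1
  obtain ⟨c, hc⟩ := List.exists_mem_of_ne_nil _ hne
  simp [PySem.Str.strIsalpha, PySem.Chars.strIsalpha]
  intro _ _
  exact ⟨c, hc, by simpa using digit_not_alpha c (h.2 c hc)⟩

theorem space_append_not_alpha (char n : String) :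
    PySem.Str.strIsalpha (char ++ " " ++ n) = false := by
  simp [PySem.Str.strIsalpha, PySem.Chars.strIsalpha]
  intro _ hsp
  exact absurd hsp (by decide)

-- the `first` flag is irrelevant while merging = false
theorem foldl_first_irrel (l : List String) :
    ∀ out f f', (l.foldl stepB (out, false, f)).1 = (l.foldl stepB (out, false, f')).1 := by
  induction l with
  | nil => intro out f f'; rfl
  | cons t ts ih =>
    intro out f f'
    simp only [List.foldl_cons, stepB]
    split
    · rfl
    · split
      · exact ih (t :: out) f f'
      · exact ih (t :: out) f f'

-- when the next token is not numeric, the whole state beyond `out` is irrelevant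
theorem foldl_nondigit_head (l : List String)
    (h : ∀ t ts, l = t :: ts → PySem.Str.strIsdigit t = false) :
    ∀ out m f, (l.foldl stepB (out, m, f)).1 = (l.foldl stepB (out, false, false)).1 := by
  cases l with
  | nil => intro out m f; rfl
  | cons t ts =>
    intro out m f
    have ht : PySem.Str.strIsdigit t = false := h t ts rfl
    by_cases ha : PySem.Str.strIsalpha t = true
    · simp only [List.foldl_cons, stepB, ha, if_true]
    · have ha' : PySem.Str.strIsalpha t = false := by simpa using ha
      simp only [List.foldl_cons, stepB, ha', ht, Bool.false_eq_true, if_false]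
      exact foldl_first_irrel ts (t :: out) f false

-- the merged-phase invariant: B's fold on the unconsumed tokens tracks A's inner while
theorem foldl_absorb (l : List String) :
    ∀ char out, PySem.Str.strIsalpha char = false →
      (l.foldl stepB (char :: out, true, false)).1
        = ((absorbA char l).2.foldl stepB ((absorbA char l).1 :: out, true, false)).1 := by
  induction l with
  | nil => intro char out _; rfl
  | cons n rest ih =>
    intro char out hchar
    by_cases hd : PySem.Str.strIsdigit n = true
    · simp only [List.foldl_cons, stepB, strdigit_not_alpha n hd, hd, absorbA, hchar,
        Bool.false_eq_true, if_false, if_true]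
      exact ih (char ++ n) out (append_digit_not_alpha char n hd)
    · have hd' : PySem.Str.strIsdigit n = false := by simpa using hd
      simp only [absorbA, hd', Bool.false_eq_true, if_false]

theorem absorbA_head_nondigit (l : List String) :
    ∀ char t ts, (absorbA char l).2 = t :: ts → PySem.Str.strIsdigit t = false := by
  induction l with
  | nil => intro char t ts h; simp [absorbA] at h
  | cons n rest ih =>
    intro char t ts h
    by_cases hd : PySem.Str.strIsdigit n = true
    · simp only [absorbA, hd, if_true] at h
      exact ih _ t ts h
    · have hd' : PySem.Str.strIsdigit n = false := by simpa using hd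
      simp only [absorbA, hd', Bool.false_eq_true, if_false] at h
      cases h
      exact hd'

theorem main_foldl : ∀ (N : ℕ) (l : List String), l.length ≤ N →
    ∀ out f, (l.foldl stepB (out, false, f)).1 = (fixNamecell l).reverse ++ out := by
  intro N
  induction N with
  | zero =>
    intro l hl out f
    have : l = [] := List.eq_nil_of_length_eq_zero (Nat.le_zero.mp hl)
    subst this; simp [fixNamecell]
  | succ N ih =>
    intro l hl out f
    cases l with
    | nil => simp [fixNamecell]
    | cons c rest =>
      simp only [List.length_cons, Nat.succ_le_succ_iff] at hl
      by_cases hc : PySem.Str.strIsalpha c = true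
      · -- alpha token: B enters merging state; A runs absorbA
        simp only [List.foldl_cons, stepB, hc, if_true]
        cases rest with
        | nil => simp [fixNamecell, absorbA]
        | cons n rest2 =>
          by_cases hn : PySem.Str.strIsdigit n = true
          · -- first numeric absorbed with a space
            simp only [List.foldl_cons, stepB, strdigit_not_alpha n hn, hn,
              Bool.false_eq_true, if_false, if_true]
            have h1 := foldl_absorb rest2 (c ++ " " ++ n) out (space_append_not_alpha c n)
            set p := absorbA (c ++ " " ++ n) rest2 with hp
            have h2 : (p.2.foldl stepB (p.1 :: out, true, false)).1
                = (p.2.foldl stepB (p.1 :: out, false, false)).1 :=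
              foldl_nondigit_head p.2 (fun t ts h => absorbA_head_nondigit rest2 _ t ts (hp ▸ h)) _ true false
            have hlen : p.2.length ≤ N := by
              have hll := absorbA_len rest2 (c ++ " " ++ n)
              rw [← hp] at hll
              simp only [List.length_cons] at hl
              omega
            have h3 := ih p.2 hlen (p.1 :: out) false
            rw [h1, h2, h3]
            have hcC : PySem.Chars.strIsalpha c.toList = true := hc
            have hnC : PySem.Chars.strIsdigit n.toList = true := hn
            have : fixNamecell (c :: n :: rest2) = p.1 :: fixNamecell p.2 := by
              rw [fixNamecell]
              simp [hcC, hnC, absorbA, ← hp]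
            rw [this]
            simp
          · -- next token not numeric: nothing absorbed
            have h2 := foldl_nondigit_head (n :: rest2)
              (fun t ts h => by cases h; simpa using hn) (c :: out) true true
            rw [h2, ih (n :: rest2) (by simpa using hl) (c :: out) false]
            have hcC : PySem.Chars.strIsalpha c.toList = true := hc
            have hnC : PySem.Chars.strIsdigit n.toList = false := by simpa using hn
            have : fixNamecell (c :: n :: rest2) = c :: fixNamecell (n :: rest2) := by
              rw [fixNamecell]
              simp [hcC, hnC, absorbA]
            rw [this]
            simp
      · -- non-alpha token: appended standalone by both
        have hstep : stepB (out, false, f) c = (c :: out, false, f) := by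
          simp only [stepB, hc, Bool.false_eq_true, if_false]
          split <;> rfl
        rw [List.foldl_cons, hstep, ih rest hl (c :: out) f]
        have hcC : PySem.Chars.strIsalpha c.toList = false := by simpa using hc
        have : fixNamecell (c :: rest) = c :: fixNamecell rest := by
          rw [fixNamecell]; simp [hcC]
        rw [this]
        simp

-- ===== VERDICT (by name: the statement is the Claim_ definition above) =====
theorem fixNamecell_spec : Claim_equal_fixNamecell := by
  intro stringlist _
  unfold Spec_fixNamecell fixNamecell_alt
  rw [main_foldl stringlist.length stringlist le_rfl [] false]
  simp
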